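-- pv_equiv track=rewrite | github.com/Tenjin25/VARealignment | Scripts/enrich_research_findings_detailed.py | resolve_counties
-- ===== SOURCE A (Python) =====
-- from typing import Dict, List, Optional, Tuple
--
-- def normalize(s: str) -> str:
--     """Normalize string for matching."""
--     return " ".join(s.strip().lower().split())
--
-- def resolve_counties(requested: List[str], available: List[str]) -> List[str]:
--     """Resolve county names from user input."""
--     if not requested:
--         return []
--
--     avail_norm = {normalize(c): c for c in available}
--     out = []
--
--     for raw in requested:
--         query = normalize(raw)
--         if not query:
--             continue
--
--         if query in avail_norm:
--             out.append(avail_norm[query])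
--             continue
--
--         partials = sorted({name for key, name in avail_norm.items() if query in key})
--         if len(partials) == 1:
--             out.append(partials[0])
--             continue
--         if not partials:
--             raise RuntimeError(f"County '{raw}' not found in selected contest/year data")
--
--         raise RuntimeError(f"County '{raw}' is ambiguous. Matches: {', '.join(partials[:8])}")
--
--     deduped = []
--     seen = set()
--     for county in out:
--         if county in seen:
--             continue
--         seen.add(county)
--         deduped.append(county)
--     return deduped
-- ===== SOURCE B (Python) =====
-- from typing import List
--
-- def normalize(s: str) -> str:
--     """Normalize string for matching."""
--     return " ".join(s.strip().lower().split())
--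
-- def resolve_counties(requested: List[str], available: List[str]) -> List[str]:
--     """Resolve county names via precomputed inverted match tables.
--
--     Instead of matching each query against the whole county table (per-query
--     scans / lookups), B collects the distinct normalized queries first, then
--     makes ONE county-major pass over the normalized counties that fills two
--     inverted tables (exact hit and partial-match set per query), and finally
--     emits results in request order from the tables, deduplicating on the fly.
--     """
--     if not requested:
--         return []
--
--     # distinct nonempty normalized queries, in first-occurrence order
--     queries = []
--     qset = set()
--     for raw in requested:
--         q = normalize(raw)
--         if q and q not in qset:
--             qset.add(q)
--             queries.append(q)
--
--     # normalized counties (last value wins per key, as a dict build does)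
--     avail_norm = {normalize(c): c for c in available}
--
--     # one county-major pass filling the inverted tables
--     exact = {}
--     partial = {q: set() for q in queries}
--     for key, name in avail_norm.items():
--         for q in queries:
--             if q == key:
--                 exact[q] = name
--             elif q in key:
--                 partial[q].add(name)
--
--     # emit in request order with fused dedup
--     seen = set()
--     result = []
--     for raw in requested:
--         q = normalize(raw)
--         if not q:
--             continue
--         if q in exact:
--             county = exact[q]
--         else:
--             ps = sorted(partial[q])
--             if len(ps) == 1:
--                 county = ps[0]
--             elif not ps:
--                 raise RuntimeError(f"County '{raw}' not found in selected contest/year data")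
--             else:
--                 raise RuntimeError(f"County '{raw}' is ambiguous. Matches: {', '.join(ps[:8])}")
--         if county not in seen:
--             seen.add(county)
--             result.append(county)
--     return result
-- ===== Notes on version B (the rewrite author's own statement) =====
-- stated objective: alternative
-- what changed: B inverts the matching: it collects the distinct normalized queries up front, fills inverted exact/partial match tables in a single county-major pass over the normalized counties (A instead matches query-major, scanning the whole dict per query with a set comprehension), and then emits results in request order from the tables with dedup fused into the emit loop instead of A's separate trailing dedup pass; Pre_ excludes exactly the inputs on which both programs raise RuntimeError (unmatched or ambiguous query).
import Mathlib
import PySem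

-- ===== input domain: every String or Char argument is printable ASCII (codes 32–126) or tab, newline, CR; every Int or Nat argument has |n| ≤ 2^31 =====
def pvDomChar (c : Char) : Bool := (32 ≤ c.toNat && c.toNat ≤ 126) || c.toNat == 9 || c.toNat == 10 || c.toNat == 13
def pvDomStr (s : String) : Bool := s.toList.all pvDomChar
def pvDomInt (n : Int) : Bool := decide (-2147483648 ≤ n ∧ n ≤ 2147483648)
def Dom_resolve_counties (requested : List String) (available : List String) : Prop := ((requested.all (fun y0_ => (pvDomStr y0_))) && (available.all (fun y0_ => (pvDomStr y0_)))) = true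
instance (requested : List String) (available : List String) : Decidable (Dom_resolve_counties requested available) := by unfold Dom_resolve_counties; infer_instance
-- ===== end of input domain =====

-- B inverts the matching: it collects the distinct normalized queries up front, fills inverted
-- exact/partial match tables in a single county-major pass over the normalized counties, and emits
-- results in request order from the tables with dedup fused in (A matches query-major with a dict
-- lookup plus per-query set-comprehension scan and a trailing dedup pass); equal wherever A
-- returns (Pre_ excludes exactly the RuntimeError inputs).


-- ===== PORT A =====
-- normalize(s) = " ".join(s.strip().lower().split())
def pvNormalize (s : String) : String :=
  PySem.Str.join " " (PySem.Str.split₀ (PySem.Str.lower (PySem.Str.strip s)))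

-- avail_norm = {normalize(c): c for c in available}  (both Pythons build this dict)
def pvAvail (available : List String) : PySem.Dict String String :=
  available.foldl (fun d c => d.insert (pvNormalize c) c) PySem.Dict.empty

-- the 3-line dedup body both Pythons contain verbatim: skip if seen, else record and append
def pvDedupStep (st : PySem.Set String × List String) (county : String) :
    PySem.Set String × List String :=
  if PySem.Set.contains st.1 county then st
  else (PySem.Set.add st.1 county, st.2 ++ [county])

-- A's main loop; `none` = the RuntimeError paths (not found / ambiguous), excluded by Pre_
def pvLoopA (d : PySem.Dict String String) : List String → List String → Option (List String)
  | [], out => some out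
  | raw :: rest, out =>
    let query := pvNormalize raw
    if query = "" then pvLoopA d rest out
    else
      match d.get? query with
      | some name => pvLoopA d rest (out ++ [name])
      | none =>
        let partials := PySem.List.sorted
          (PySem.Set.ofList ((d.items.filter (fun kv => PySem.Str.isIn query kv.1)).map (fun kv => kv.2)))
          (fun x => x) false
        if partials.length = 1 then pvLoopA d rest (out ++ [partials.headD ""])  -- partials[0]
        else none  -- raise RuntimeError

-- A's trailing dedup pass over out, with seen/deduped accumulator
def pvDedupGo (st : PySem.Set String × List String) (out : List String) :
    PySem.Set String × List String :=
  out.foldl pvDedupStep st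

def resolve_counties (requested : List String) (available : List String) : List String :=
  if requested = [] then []
  else
    match pvLoopA (pvAvail available) requested [] with
    | some out => (pvDedupGo ([], []) out).2
    | none => []  -- Python raises RuntimeError here; excluded by Pre_

-- ===== PORT B =====
-- B step 1: collect the distinct nonempty normalized queries, in first-occurrence order
def pvCollectStep (st : PySem.Set String × List String) (raw : String) :
    PySem.Set String × List String :=
  let q := pvNormalize raw
  if q = "" then st
  else if PySem.Set.contains st.1 q then st
  else (PySem.Set.add st.1 q, st.2 ++ [q])

def pvCollectQ (requested : List String) : List String :=
  (requested.foldl pvCollectStep (([] : PySem.Set String), ([] : List String))).2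

-- partial = {q: set() for q in queries}
def pvInitPartial (queries : List String) : PySem.Dict String (PySem.Set String) :=
  queries.foldl (fun d q => d.insert q ([] : PySem.Set String)) PySem.Dict.empty

-- inner body: for q in queries: if q == key: exact[q] = name; elif q in key: partial[q].add(name)
-- (partial[q]: q is always a present key of partial here, so modify with default ∅ is exact)
def pvTabStep (key name : String)
    (st : PySem.Dict String String × PySem.Dict String (PySem.Set String)) (q : String) :
    PySem.Dict String String × PySem.Dict String (PySem.Set String) :=
  if q = key then (st.1.insert q name, st.2)
  else if PySem.Str.isIn q key then
    (st.1, st.2.modify q ([] : PySem.Set String) (fun s => PySem.Set.add s name))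
  else st

-- B step 2: one county-major pass over the normalized items filling both tables
def pvTables (queries : List String) (items : List (String × String)) :
    PySem.Dict String String × PySem.Dict String (PySem.Set String) :=
  items.foldl (fun st kv => queries.foldl (pvTabStep kv.1 kv.2) st)
    (PySem.Dict.empty, pvInitPartial queries)

-- B step 3: emit in request order from the tables, dedup fused; `none` = the RuntimeError paths
def pvEmitB (exact : PySem.Dict String String) (part : PySem.Dict String (PySem.Set String)) :
    List String → PySem.Set String × List String → Option (PySem.Set String × List String)
  | [], st => some st
  | raw :: rest, st =>
    let q := pvNormalize raw
    if q = "" then pvEmitB exact part rest st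
    else
      match exact.get? q with
      | some county => pvEmitB exact part rest (pvDedupStep st county)
      | none =>
        let ps := PySem.List.sorted (part.getD q []) (fun x => x) false
        if ps.length = 1 then pvEmitB exact part rest (pvDedupStep st (ps.headD ""))
        else none  -- raise RuntimeError (not found / ambiguous)

def resolve_counties_alt (requested : List String) (available : List String) : List String :=
  if requested = [] then []
  else
    let t := pvTables (pvCollectQ requested) (pvAvail available).items
    match pvEmitB t.1 t.2 requested ([], []) with
    | some st => st.2
    | none => []  -- Python raises RuntimeError here; excluded by Pre_

-- ===== PRECONDITION & SPEC =====
-- Pre_ admits exactly the inputs on which Python A returns: every nonempty normalized query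
-- either is a key of the normalized dict or has exactly one distinct partial-match name
-- (otherwise A raises RuntimeError).
def Pre_resolve_counties (requested : List String) (available : List String) : Prop :=
  ∀ raw ∈ requested,
    pvNormalize raw = "" ∨
    (pvAvail available).contains (pvNormalize raw) = true ∨
    (PySem.Set.ofList (((pvAvail available).items.filter
      (fun kv => PySem.Str.isIn (pvNormalize raw) kv.1)).map (fun kv => kv.2))).length = 1

instance (requested : List String) (available : List String) :
    Decidable (Pre_resolve_counties requested available) := by
  unfold Pre_resolve_counties; infer_instance

def pvWitness_resolve_counties : List String × List String := ([], [])

def Spec_resolve_counties (requested : List String) (available : List String) (out : List String) : Prop := out = resolve_counties_alt requested available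
instance (requested : List String) (available : List String) (out : List String) : Decidable (Spec_resolve_counties requested available out) := by unfold Spec_resolve_counties; infer_instance

-- ===== CLAIM (what is proved, stated in full; the proofs are below) =====
def Claim_equal_resolve_counties : Prop := ∀ (requested : List String) (available : List String), Dom_resolve_counties requested available → Pre_resolve_counties requested available → Spec_resolve_counties requested available (resolve_counties requested available)

-- ===== LEMMAS AND PROOFS =====

-- the collected query list: every nonempty normalized query of requested is in it
theorem pvCollectQ_mono :
    ∀ (reqs : List String) (st : PySem.Set String × List String) (x : String),
      x ∈ st.2 → x ∈ (reqs.foldl pvCollectStep st).2 := by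
  intro reqs
  induction reqs with
  | nil => intro st x hx; exact hx
  | cons a rest ih =>
    intro st x hx
    apply ih
    simp only [pvCollectStep]
    split_ifs <;> simp [hx]

theorem pvCollectQ_mem_aux :
    ∀ (reqs : List String) (st : PySem.Set String × List String), st.1 = st.2 →
      ∀ raw ∈ reqs, pvNormalize raw ≠ "" →
        pvNormalize raw ∈ (reqs.foldl pvCollectStep st).2 := by
  intro reqs
  induction reqs with
  | nil => intro st _ raw hr; simp at hr
  | cons a rest ih =>
    intro st hst raw hr hq
    have hstep : (pvCollectStep st a).1 = (pvCollectStep st a).2 := by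
      simp only [pvCollectStep]
      split_ifs with h1 h2
      · exact hst
      · exact hst
      · have hnm : pvNormalize a ∉ st.1 := fun hm =>
          h2 ((PySem.Set.contains_iff _ _).mpr hm)
        simp only
        rw [PySem.Set.add_of_not_mem hnm, hst]
    rcases List.mem_cons.mp hr with rfl | hmem
    · have hin : pvNormalize raw ∈ (pvCollectStep st raw).2 := by
        simp only [pvCollectStep]
        split_ifs with h1 h2
        · exact absurd h1 hq
        · have := (PySem.Set.contains_iff _ _).mp h2
          rw [hst] at this
          exact this
        · simp
      rw [List.foldl_cons]
      exact pvCollectQ_mono rest _ _ hin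
    · rw [List.foldl_cons]
      exact ih _ hstep raw hmem hq

theorem pvCollectQ_mem : ∀ (requested : List String) (raw : String), raw ∈ requested →
    pvNormalize raw ≠ "" → pvNormalize raw ∈ pvCollectQ requested := by
  intro requested raw hr hq
  exact pvCollectQ_mem_aux requested ([], []) rfl raw hr hq

-- one pvTabStep, exact component
theorem pvTabStep_exact (key name q a : String)
    (st : PySem.Dict String String × PySem.Dict String (PySem.Set String)) :
    (pvTabStep key name st a).1.get? q =
      if q = a ∧ a = key then some name else st.1.get? q := by
  unfold pvTabStep
  by_cases h1 : a = key
  · rw [if_pos h1]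
    dsimp only
    rw [PySem.Dict.get?_insert]
    by_cases hqa : q = a
    · rw [if_pos hqa, if_pos ⟨hqa, h1⟩]
    · rw [if_neg hqa, if_neg (fun h => hqa h.1)]
  · rw [if_neg h1, if_neg (fun h : q = a ∧ a = key => h1 h.2)]
    split_ifs <;> rfl

-- one pvTabStep, partial component
theorem pvTabStep_part (key name q a : String)
    (st : PySem.Dict String String × PySem.Dict String (PySem.Set String)) :
    (pvTabStep key name st a).2.getD q [] =
      if q = a ∧ a ≠ key ∧ PySem.Str.isIn q key then
        PySem.Set.add (st.2.getD q []) name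
      else st.2.getD q [] := by
  unfold pvTabStep
  by_cases h1 : a = key
  · rw [if_pos h1, if_neg (fun h => h.2.1 h1)]
  · rw [if_neg h1]
    by_cases h2 : PySem.Str.isIn a key = true
    · rw [if_pos h2]
      dsimp only
      rw [PySem.Dict.getD_modify]
      by_cases hqa : q = a
      · subst hqa
        rw [if_pos rfl, if_pos ⟨rfl, h1, h2⟩]
      · rw [if_neg hqa, if_neg (fun h => hqa h.1)]
    · rw [if_neg h2,
        if_neg (fun h : q = a ∧ a ≠ key ∧ PySem.Str.isIn q key = true => h2 (h.1 ▸ h.2.2))]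

-- the inner fold over queries, exact component
theorem pvTabFold_exact (key name q : String) (qs : List String)
    (st : PySem.Dict String String × PySem.Dict String (PySem.Set String)) :
    (qs.foldl (pvTabStep key name) st).1.get? q =
      if q ∈ qs ∧ q = key then some name else st.1.get? q := by
  induction qs generalizing st with
  | nil => simp
  | cons a rest ih =>
    rw [List.foldl_cons, ih, pvTabStep_exact]
    simp only [List.mem_cons]
    by_cases h1 : q = key <;> by_cases h2 : q ∈ rest <;> by_cases h3 : q = a <;> simp_all

-- the inner fold over queries, partial component
theorem pvTabFold_part (key name q : String) (qs : List String)
    (st : PySem.Dict String String × PySem.Dict String (PySem.Set String)) :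
    (qs.foldl (pvTabStep key name) st).2.getD q [] =
      if q ∈ qs ∧ q ≠ key ∧ PySem.Str.isIn q key then
        PySem.Set.add (st.2.getD q []) name
      else st.2.getD q [] := by
  have idem : ∀ (s : PySem.Set String) (n : String),
      PySem.Set.add (PySem.Set.add s n) n = PySem.Set.add s n := by
    intro s n
    exact PySem.Set.add_of_mem (by simp [PySem.Set.mem_add])
  induction qs generalizing st with
  | nil => simp
  | cons a rest ih =>
    rw [List.foldl_cons, ih, pvTabStep_part]
    simp only [List.mem_cons]
    by_cases h1 : q = key <;> by_cases h2 : q ∈ rest <;> by_cases h3 : q = a <;>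
      by_cases h4 : PySem.Str.isIn q key = true <;> simp_all

-- the initial partial table reads as ∅ everywhere (present keys hold ∅, absent default to ∅)
theorem pvInitPartial_getD_aux :
    ∀ (qs : List String) (d : PySem.Dict String (PySem.Set String)),
      (∀ q, d.getD q [] = []) → ∀ q,
        (qs.foldl (fun d q => d.insert q ([] : PySem.Set String)) d).getD q [] = [] := by
  intro qs
  induction qs with
  | nil => intro d hd q; exact hd q
  | cons a rest ih =>
    intro d hd q
    rw [List.foldl_cons]
    refine ih _ (fun q' => ?_) q
    rw [PySem.Dict.getD_insert]
    split_ifs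
    · rfl
    · exact hd q'

theorem pvInitPartial_getD (queries : List String) (q : String) :
    (pvInitPartial queries).getD q [] = [] := by
  unfold pvInitPartial
  exact pvInitPartial_getD_aux queries PySem.Dict.empty
    (fun q' => PySem.Dict.getD_empty _ _) q

-- last-assignment fold = first-match lookup when keys are nodup
theorem pvLast_no_match (q : String) :
    ∀ (items : List (String × String)) (acc : Option String),
      (∀ kv ∈ items, q ≠ kv.1) →
      items.foldl (fun acc kv => if q = kv.1 then some kv.2 else acc) acc = acc := by
  intro items
  induction items with
  | nil => intro acc _; rfl
  | cons kv rest ih =>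
    intro acc hno
    rw [List.foldl_cons, if_neg (hno kv List.mem_cons_self)]
    exact ih acc (fun kv' h => hno kv' (List.mem_cons_of_mem _ h))

theorem pvLast_eq_get? (items : List (String × String)) (q : String)
    (hnd : (items.map Prod.fst).Nodup) :
    items.foldl (fun acc kv => if q = kv.1 then some kv.2 else acc) none =
      (items.find? (fun p => p.1 == q)).map (fun p => p.2) := by
  induction items with
  | nil => rfl
  | cons kv rest ih =>
    rw [List.map_cons, List.nodup_cons] at hnd
    by_cases hqk : q = kv.1
    · rw [List.foldl_cons, if_pos hqk, List.find?_cons_of_pos (by simp [hqk]),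
        pvLast_no_match q rest (some kv.2) (fun kv' h hq' => hnd.1 (by
          rw [← hqk, hq']; exact List.mem_map_of_mem (f := Prod.fst) h))]
      rfl
    · rw [List.foldl_cons, if_neg hqk,
        List.find?_cons_of_neg (by simp only [beq_iff_eq]; exact fun h => hqk h.symm)]
      exact ih hnd.2

-- outer fold, exact component (for q among the queries)
theorem pvTables_exact (queries : List String) (items : List (String × String)) (q : String)
    (hq : q ∈ queries) :
    (pvTables queries items).1.get? q =
      items.foldl (fun acc kv => if q = kv.1 then some kv.2 else acc) none := by
  have aux : ∀ (its : List (String × String))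
      (st : PySem.Dict String String × PySem.Dict String (PySem.Set String)),
      ((its.foldl (fun st kv => queries.foldl (pvTabStep kv.1 kv.2) st) st).1).get? q =
        its.foldl (fun acc kv => if q = kv.1 then some kv.2 else acc) (st.1.get? q) := by
    intro its
    induction its with
    | nil => intro st; rfl
    | cons kv rest ih =>
      intro st
      rw [List.foldl_cons, List.foldl_cons, ih]
      congr 1
      rw [pvTabFold_exact]
      by_cases hqk : q = kv.1
      · rw [if_pos ⟨hq, hqk⟩, if_pos hqk]
      · rw [if_neg (fun h => hqk h.2), if_neg hqk]
  unfold pvTables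
  rw [aux items (PySem.Dict.empty, pvInitPartial queries), PySem.Dict.get?_empty]

-- outer fold, partial component (for q among the queries)
theorem pvTables_part (queries : List String) (items : List (String × String)) (q : String)
    (hq : q ∈ queries) :
    (pvTables queries items).2.getD q [] =
      items.foldl (fun s kv =>
        if q ≠ kv.1 ∧ PySem.Str.isIn q kv.1 then PySem.Set.add s kv.2 else s) [] := by
  have aux : ∀ (its : List (String × String))
      (st : PySem.Dict String String × PySem.Dict String (PySem.Set String)),
      ((its.foldl (fun st kv => queries.foldl (pvTabStep kv.1 kv.2) st) st).2).getD q [] =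
        its.foldl (fun s kv =>
          if q ≠ kv.1 ∧ PySem.Str.isIn q kv.1 then PySem.Set.add s kv.2 else s)
          (st.2.getD q []) := by
    intro its
    induction its with
    | nil => intro st; rfl
    | cons kv rest ih =>
      intro st
      rw [List.foldl_cons, List.foldl_cons, ih]
      congr 1
      rw [pvTabFold_part]
      by_cases hc : q ≠ kv.1 ∧ PySem.Str.isIn q kv.1 = true
      · rw [if_pos ⟨hq, hc.1, hc.2⟩, if_pos hc]
      · rw [if_neg (fun h => hc ⟨h.2.1, h.2.2⟩), if_neg hc]
  unfold pvTables
  rw [aux items (PySem.Dict.empty, pvInitPartial queries), pvInitPartial_getD]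

-- when q matches no key, the guarded fold is A's set comprehension
set_option maxHeartbeats 1000000 in
theorem pvPart_eq_ofList (items : List (String × String)) (q : String)
    (hno : ∀ kv ∈ items, q ≠ kv.1) :
    items.foldl (fun s kv =>
        if q ≠ kv.1 ∧ PySem.Str.isIn q kv.1 then PySem.Set.add s kv.2 else s) [] =
      PySem.Set.ofList ((items.filter (fun kv => PySem.Str.isIn q kv.1)).map (fun kv => kv.2)) := by
  rw [PySem.Set.ofList_eq_foldl]
  have aux : ∀ (its : List (String × String)) (s : PySem.Set String),
      (∀ kv ∈ its, q ≠ kv.1) →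
      its.foldl (fun s kv =>
          if q ≠ kv.1 ∧ PySem.Str.isIn q kv.1 then PySem.Set.add s kv.2 else s) s =
        List.foldl PySem.Set.add s
          ((its.filter (fun kv => PySem.Str.isIn q kv.1)).map (fun kv => kv.2)) := by
    intro its
    induction its with
    | nil => intro s _; rfl
    | cons kv rest ih =>
      intro s hno'
      have hne : q ≠ kv.1 := hno' kv List.mem_cons_self
      have hrest := fun kv' h => hno' kv' (List.mem_cons_of_mem _ h)
      by_cases hin : PySem.Str.isIn q kv.1 = true
      · rw [List.foldl_cons, if_pos ⟨hne, hin⟩,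
          List.filter_cons_of_pos (p := fun kv => PySem.Str.isIn q kv.1) (a := kv) hin,
          List.map_cons, List.foldl_cons]
        exact ih _ hrest
      · rw [List.foldl_cons, if_neg (fun h => hin h.2),
          List.filter_cons_of_neg (p := fun kv => PySem.Str.isIn q kv.1) (a := kv) hin]
        exact ih _ hrest
  exact aux items [] hno

-- the built dict has nodup keys
theorem pvAvail_keys_nodup (available : List String) : (pvAvail available).keys.Nodup := by
  have h := PySem.Dict.keys_foldl_insert_key (l := available) (key := pvNormalize)
    (f := fun (_ : PySem.Dict String String) (c : String) => c) (d := PySem.Dict.empty)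
  unfold pvAvail
  rw [h]
  have h2 : PySem.Set.update (PySem.Dict.empty : PySem.Dict String String).keys
      (available.map pvNormalize) = PySem.Set.ofList (available.map pvNormalize) := by
    rw [PySem.Set.ofList_eq_foldl]; rfl
  rw [h2]
  exact PySem.Set.nodup_ofList _

-- loopA with accumulator out = loopA from [] with out prefixed
theorem pvLoopA_append (d : PySem.Dict String String) (req : List String) (out : List String) :
    pvLoopA d req out = (pvLoopA d req []).map (fun l => out ++ l) := by
  induction req generalizing out with
  | nil => simp [pvLoopA]
  | cons raw rest ih =>
    rw [pvLoopA, pvLoopA]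
    by_cases hq : pvNormalize raw = ""
    · simpa only [if_pos hq] using ih out
    · simp only [if_neg hq]
      cases hg : d.get? (pvNormalize raw) with
      | some name =>
        simp only
        rw [ih (out ++ [name]), ih ([] ++ [name])]
        cases pvLoopA d rest [] <;> simp
      | none =>
        generalize (PySem.List.sorted (PySem.Set.ofList ((d.items.filter
            (fun kv => PySem.Str.isIn (pvNormalize raw) kv.1)).map (fun kv => kv.2)))
            (fun x => x) false) = partials
        by_cases hp : partials.length = 1
        · rw [if_pos hp, if_pos hp, ih (out ++ [partials.headD ""]),
            ih ([] ++ [partials.headD ""])]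
          cases pvLoopA d rest [] <;> simp
        · rw [if_neg hp, if_neg hp]
          rfl

-- folding the dedup step distributes over cons
theorem pvDedupGo_cons (st : PySem.Set String × List String) (c : String) (out : List String) :
    pvDedupGo st (c :: out) = pvDedupGo (pvDedupStep st c) out := rfl

-- contains means get? finds a value
theorem pvContains_get? (d : PySem.Dict String String) (q : String)
    (h : d.contains q = true) : ∃ n, d.get? q = some n := by
  unfold PySem.Dict.contains at h
  rw [List.any_eq_true] at h
  obtain ⟨p, hp, hpq⟩ := h
  have h2 : (d.items.find? (fun p => p.1 == q)).isSome :=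
    List.find?_isSome.mpr ⟨p, hp, hpq⟩
  rw [Option.isSome_iff_exists] at h2
  obtain ⟨p2, hp2⟩ := h2
  exact ⟨p2.2, by unfold PySem.Dict.get?; rw [hp2]; rfl⟩

-- main invariant: under Pre_, A's loop returns some out and B's emit loop computes
-- exactly the dedup fold of out continued from any (seen, result) state
theorem pvMain (d : PySem.Dict String String) (hnd : d.keys.Nodup) (queries : List String) :
    ∀ (req : List String),
      (∀ raw ∈ req, pvNormalize raw ≠ "" → pvNormalize raw ∈ queries) →
      (∀ raw ∈ req,
        pvNormalize raw = "" ∨ d.contains (pvNormalize raw) = true ∨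
        (PySem.Set.ofList ((d.items.filter
          (fun kv => PySem.Str.isIn (pvNormalize raw) kv.1)).map (fun kv => kv.2))).length = 1) →
      ∀ st, ∃ out, pvLoopA d req [] = some out ∧
        pvEmitB (pvTables queries d.items).1 (pvTables queries d.items).2 req st =
          some (pvDedupGo st out) := by
  intro req
  induction req with
  | nil => intro _ _ st; exact ⟨[], rfl, rfl⟩
  | cons raw rest ih =>
    intro hqs hpre st
    have hqrest := fun r hr => hqs r (List.mem_cons_of_mem _ hr)
    have hrest := fun r hr => hpre r (List.mem_cons_of_mem _ hr)
    have hraw := hpre raw List.mem_cons_self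
    by_cases hq : pvNormalize raw = ""
    · obtain ⟨out, hA, hB⟩ := ih hqrest hrest st
      exact ⟨out, by rw [pvLoopA]; simp only [if_pos hq]; exact hA,
              by rw [pvEmitB]; simp only [if_pos hq]; exact hB⟩
    · have hqmem : pvNormalize raw ∈ queries := hqs raw List.mem_cons_self hq
      have hex : (pvTables queries d.items).1.get? (pvNormalize raw) =
          d.get? (pvNormalize raw) := by
        rw [pvTables_exact queries d.items _ hqmem, pvLast_eq_get? d.items _ hnd]
        rfl
      cases hg : d.get? (pvNormalize raw) with
      | some name =>
        obtain ⟨out, hA, hB⟩ := ih hqrest hrest (pvDedupStep st name)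
        refine ⟨name :: out, ?_, ?_⟩
        · rw [pvLoopA]
          simp only [if_neg hq, hg]
          rw [pvLoopA_append, hA]; rfl
        · rw [pvEmitB]
          simp only [if_neg hq, hex, hg]
          simpa only [pvDedupGo_cons] using hB
      | none =>
        have hnokey : ∀ p ∈ d.items, pvNormalize raw ≠ p.1 := by
          intro p hp hpq
          have h2 : (d.items.find? (fun p => p.1 == pvNormalize raw)).isSome :=
            List.find?_isSome.mpr ⟨p, hp, by simp [hpq.symm]⟩
          unfold PySem.Dict.get? at hg
          rw [Option.isSome_iff_exists] at h2
          obtain ⟨p2, hp2⟩ := h2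
          rw [hp2] at hg
          simp at hg
        have hcon : d.contains (pvNormalize raw) ≠ true := by
          intro hc
          obtain ⟨n, hn⟩ := pvContains_get? d _ hc
          rw [hg] at hn
          cases hn
        have hlen : (PySem.Set.ofList ((d.items.filter
            (fun kv => PySem.Str.isIn (pvNormalize raw) kv.1)).map (fun kv => kv.2))).length = 1 := by
          rcases hraw with h | h | h
          · exact absurd h hq
          · exact absurd h hcon
          · exact h
        have hpartT : (pvTables queries d.items).2.getD (pvNormalize raw) [] =
            PySem.Set.ofList ((d.items.filter
              (fun kv => PySem.Str.isIn (pvNormalize raw) kv.1)).map (fun kv => kv.2)) := by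
          rw [pvTables_part queries d.items _ hqmem,
            pvPart_eq_ofList d.items _ hnokey]
        have hplen : (PySem.List.sorted (PySem.Set.ofList ((d.items.filter
            (fun kv => PySem.Str.isIn (pvNormalize raw) kv.1)).map (fun kv => kv.2)))
            (fun x => x) false).length = 1 := by
          rw [PySem.List.length_sorted]; exact hlen
        obtain ⟨out, hA, hB⟩ := ih hqrest hrest (pvDedupStep st ((PySem.List.sorted
          (PySem.Set.ofList ((d.items.filter
            (fun kv => PySem.Str.isIn (pvNormalize raw) kv.1)).map (fun kv => kv.2)))
          (fun x => x) false).headD ""))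
        refine ⟨((PySem.List.sorted (PySem.Set.ofList ((d.items.filter
            (fun kv => PySem.Str.isIn (pvNormalize raw) kv.1)).map (fun kv => kv.2)))
            (fun x => x) false).headD "") :: out, ?_, ?_⟩
        · rw [pvLoopA]
          simp only [if_neg hq, hg]
          rw [if_pos hplen, pvLoopA_append, hA]; rfl
        · rw [pvEmitB]
          simp only [if_neg hq, hex, hg, hpartT]
          rw [if_pos hplen]
          simpa only [pvDedupGo_cons] using hB

-- ===== VERDICT (by name: the statement is the Claim_ definition above) =====
theorem resolve_counties_spec : Claim_equal_resolve_counties := by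
  intro requested available _hdom hpre
  unfold Spec_resolve_counties resolve_counties resolve_counties_alt
  by_cases hreq : requested = []
  · simp [hreq]
  · simp only [if_neg hreq]
    obtain ⟨out, hA, hB⟩ := pvMain (pvAvail available) (pvAvail_keys_nodup available)
      (pvCollectQ requested) requested
      (fun raw hr => pvCollectQ_mem requested raw hr) hpre ([], [])
    rw [hA, hB]
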